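-- pv_equiv track=rewrite | github.com/MeluvRose/Solving_Algorithms | algorithmPy/프로그래머스/unrated/161989. 덧칠하기/덧칠하기.py | solution
-- ===== SOURCE A (Python) =====
-- def solution(n, m, section):
--     answer = 0
--
--     start = section[0];
--     answer += 1;
--     for s in section:
--         if start + m > s: continue;
--         start = s;
--         answer += 1;
--     return answer
-- ===== SOURCE B (Python) =====
-- def solution(n, m, section):
--     answer = 1
--     start = section[0]
--     rest = section
--     while True:
--         i = 0
--         while i < len(rest) and start + m > rest[i]:
--             i += 1
--         if i == len(rest):
--             return answer
--         start = rest[i]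
--         answer += 1
--         rest = rest[i + 1:]
-- ===== Notes on version B (the rewrite author's own statement) =====
-- stated objective: alternative
-- what changed: B replaces A's single element-by-element fold (skip-or-update state per element) by an outer round loop that each round searches for the next uncovered section and restarts on the suffix past it.
import Mathlib
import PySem

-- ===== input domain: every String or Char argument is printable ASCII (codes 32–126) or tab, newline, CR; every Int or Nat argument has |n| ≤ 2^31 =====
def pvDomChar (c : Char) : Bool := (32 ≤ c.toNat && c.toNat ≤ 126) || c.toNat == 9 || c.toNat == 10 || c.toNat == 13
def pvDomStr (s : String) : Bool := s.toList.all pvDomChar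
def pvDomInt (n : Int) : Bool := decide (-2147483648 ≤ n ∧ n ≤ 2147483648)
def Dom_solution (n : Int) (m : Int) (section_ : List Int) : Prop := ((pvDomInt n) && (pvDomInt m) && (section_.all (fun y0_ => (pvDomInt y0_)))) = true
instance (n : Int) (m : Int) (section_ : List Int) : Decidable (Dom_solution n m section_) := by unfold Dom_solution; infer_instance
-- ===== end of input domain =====

-- B replaces A's single fold over all elements by an outer round loop that each round
-- searches for the next uncovered section and continues on the suffix past it (alternative
-- decomposition; same return value on every nonempty section list).


-- ===== PORT A =====
-- literal port of A: answer = 0; start = section[0]; answer += 1; then one pass,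
-- skipping covered elements, otherwise start = s, answer += 1.
def solution (n : Int) (m : Int) (section_ : List Int) : Int :=
  match PySem.List.pyGet? section_ 0 with
  | none => 0  -- unreachable under Pre_solution: Python raises IndexError here
  | some s0 =>
    (section_.foldl (fun (p : Int × Int) s =>
      if p.1 + m > s then p else (s, p.2 + 1)) (s0, 0 + 1)).2

-- ===== PORT B =====
-- inner while loop of B: number of leading elements still covered by the current swipe
def coveredPrefixLen (m : Int) (start : Int) : List Int → Nat
  | [] => 0
  | s :: rest => if start + m > s then coveredPrefixLen m start rest + 1 else 0

-- inner loop never runs past the end of `rest`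
lemma coveredPrefixLen_le (m start : Int) (l : List Int) :
    coveredPrefixLen m start l ≤ l.length := by
  induction l with
  | nil => simp [coveredPrefixLen]
  | cons s rest ih =>
    simp only [coveredPrefixLen, List.length_cons]
    split_ifs <;> omega

-- outer `while True` loop of B, with `answer` as accumulator
def paintAlt (m : Int) (answer : Int) (start : Int) (rest : List Int) : Int :=
  let i := coveredPrefixLen m start rest
  if i = rest.length then answer
  else paintAlt m (answer + 1) (rest.getD i 0) (rest.drop (i + 1))
termination_by rest.length
decreasing_by
  have := coveredPrefixLen_le m start rest
  simp only [List.length_drop]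
  omega

def solution_alt (n : Int) (m : Int) (section_ : List Int) : Int :=
  match section_ with
  | [] => 0  -- unreachable under Pre_solution: Python raises IndexError here
  | s0 :: _ => paintAlt m 1 s0 section_

-- ===== PRECONDITION & SPEC =====
-- Pre_ excludes only the empty list, on which both A and B raise IndexError (section[0]).
def Pre_solution (n : Int) (m : Int) (section_ : List Int) : Prop := section_ ≠ []
instance (n : Int) (m : Int) (section_ : List Int) : Decidable (Pre_solution n m section_) := by unfold Pre_solution; infer_instance
def pvWitness_solution : Int × Int × List Int := (8, 4, [2, 4, 6])

def Spec_solution (n : Int) (m : Int) (section_ : List Int) (out : Int) : Prop := out = solution_alt n m section_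
instance (n : Int) (m : Int) (section_ : List Int) (out : Int) : Decidable (Spec_solution n m section_ out) := by unfold Spec_solution; infer_instance

-- ===== CLAIM (what is proved, stated in full; the proofs are below) =====
def Claim_equal_solution : Prop := ∀ (n : Int) (m : Int) (section_ : List Int), Dom_solution n m section_ → Pre_solution n m section_ → Spec_solution n m section_ (solution n m section_)

-- ===== LEMMAS AND PROOFS =====
lemma paintAlt_nil (m answer start : Int) : paintAlt m answer start [] = answer := by
  rw [paintAlt]
  simp [coveredPrefixLen]

-- one step of A's fold, expressed on B's round loop
lemma paintAlt_cons (m answer start s : Int) (rest : List Int) :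
    paintAlt m answer start (s :: rest) =
      if start + m > s then paintAlt m answer start rest
      else paintAlt m (answer + 1) s rest := by
  by_cases hc : start + m > s
  · -- head covered: coveredPrefixLen shifts by one, indexing/drop skip the head
    have hcpl : coveredPrefixLen m start (s :: rest) = coveredPrefixLen m start rest + 1 := by
      simp [coveredPrefixLen, hc]
    rw [if_pos hc]
    conv_lhs => rw [paintAlt]
    conv_rhs => rw [paintAlt]
    simp only [hcpl, List.length_cons, List.getD_cons_succ, List.drop_succ_cons]
    rcases eq_or_ne (coveredPrefixLen m start rest) rest.length with h | h
    · rw [if_pos (by omega), if_pos h]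
    · rw [if_neg (by omega), if_neg h]
  · -- head uncovered: i = 0, next round starts at s with the tail
    have hcpl : coveredPrefixLen m start (s :: rest) = 0 := by
      simp [coveredPrefixLen, hc]
    rw [if_neg hc]
    conv_lhs => rw [paintAlt]
    simp [hcpl]

-- A's fold equals B's round loop, for every accumulator
lemma fold_eq_paintAlt (m : Int) (l : List Int) :
    ∀ (start a : Int),
      (l.foldl (fun (p : Int × Int) s =>
        if p.1 + m > s then p else (s, p.2 + 1)) (start, a)).2 = paintAlt m a start l := by
  induction l with
  | nil => intro start a; simp [paintAlt_nil]
  | cons s rest ih =>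
    intro start a
    rw [paintAlt_cons]
    simp only [List.foldl_cons]
    by_cases hc : start + m > s
    · simp only [if_pos hc]
      exact ih start a
    · simp only [if_neg hc]
      exact ih s (a + 1)

-- ===== VERDICT (by name: the statement is the Claim_ definition above) =====
theorem solution_spec : Claim_equal_solution := by
  intro n m section_ _ hpre
  unfold Spec_solution
  match section_ with
  | [] => exact absurd rfl hpre
  | s0 :: tl =>
    show solution n m (s0 :: tl) = solution_alt n m (s0 :: tl)
    have hget : PySem.List.pyGet? (s0 :: tl) (0 : Int) = some s0 := by
      simp [PySem.List.pyGet?, PySem.List.pyIdx?]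
    simp only [solution, solution_alt, hget]
    have h01 : (0 : Int) + 1 = 1 := by norm_num
    rw [h01]
    exact fold_eq_paintAlt m (s0 :: tl) s0 1
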